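-- pv_equiv track=rewrite | github.com/owenyang123/mypython | leetcode/pingq1.py | newstring
-- ===== SOURCE A (Python) =====
-- import collections
--
-- def newstring(list1):
--     counter=collections.Counter(list1)
--     res="".join(sorted(list(set(list1))))
--     temp=0
--     for i in counter:
--         if counter[i]==0:continue
--         counter[i]-=1
--         temp+=counter[i]
--     if temp==0:return res
--     nextstr=""
--     for i in counter:
--         nextstr+=i*counter[i]
--     return res+newstring(sorted(nextstr))
-- ===== SOURCE B (Python) =====
-- import collections
--
-- def newstring(list1):
--     counter = collections.Counter(list1)
--     if not counter:
--         return ""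
--     chunks = []
--     for r in range(max(counter.values())):
--         chunks.append("".join(sorted(c for c in counter if counter[c] > r)))
--     return "".join(chunks)
-- ===== Notes on version B (the rewrite author's own statement) =====
-- stated objective: faster
-- what changed: A repeatedly rebuilds, decrements and re-sorts the whole remaining multiset of characters each round via recursion; B counts once and, for each round r below the maximum count, sorts only the distinct characters with count > r.
import Mathlib
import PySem

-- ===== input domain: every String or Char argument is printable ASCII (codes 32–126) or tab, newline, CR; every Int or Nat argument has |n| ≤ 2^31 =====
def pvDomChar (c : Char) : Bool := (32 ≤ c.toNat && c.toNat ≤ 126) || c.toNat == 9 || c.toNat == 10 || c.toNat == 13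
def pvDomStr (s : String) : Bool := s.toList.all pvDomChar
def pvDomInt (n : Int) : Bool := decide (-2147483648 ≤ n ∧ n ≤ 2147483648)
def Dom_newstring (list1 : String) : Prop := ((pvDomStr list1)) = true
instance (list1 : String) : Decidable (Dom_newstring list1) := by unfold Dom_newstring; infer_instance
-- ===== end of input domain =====

-- B replaces A's recursion (decrement the counter and re-sort the whole remaining multiset each
-- round) by a single count followed by one sorted pass over the distinct keys per round; objective: faster.

-- ===== PORT A =====
-- one step of A's first loop: `if counter[i]==0: continue; counter[i]-=1; temp+=counter[i]`
def stepA (st : PySem.Dict Char Int × Int) (i : Char) : PySem.Dict Char Int × Int :=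
  if st.1.getD i 0 == 0 then st
  else
    let d := st.1.insert i (st.1.getD i 0 - 1)
    (d, st.2 + d.getD i 0)

-- A's first loop `for i in counter: …`, run over the counter's keys (fixed before the loop)
def afterLoop (l : List Char) : PySem.Dict Char Int × Int :=
  (PySem.Dict.counter l).keys.foldl stepA (PySem.Dict.counter l, 0)

-- A's second loop `for i in counter: nextstr += i*counter[i]`
def buildNext (d : PySem.Dict Char Int) (ks : List Char) : List Char :=
  ks.foldl (fun acc i => acc ++ PySem.List.pyRepeat [i] (d.getD i 0)) []

-- The lemmas before `newstringRec` are exactly those its termination proof needs.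
-- what A's first loop computes over a nodup key list with positive counts
theorem stepA_fold (ks : List Char) (d : PySem.Dict Char Int) (t : Int)
    (hnd : ks.Nodup) (hpos : ∀ k ∈ ks, 1 ≤ d.getD k 0) :
    (∀ c, (ks.foldl stepA (d, t)).1.getD c 0 =
        if c ∈ ks then d.getD c 0 - 1 else d.getD c 0) ∧
    (ks.foldl stepA (d, t)).1.keys = d.keys ∧
    (ks.foldl stepA (d, t)).2 = t + (ks.map (fun k => d.getD k 0 - 1)).sum := by
  induction ks generalizing d t with
  | nil => simp
  | cons k ks ih =>
    have hk : 1 ≤ d.getD k 0 := hpos k (by simp)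
    have hcont : d.contains k = true := by
      by_contra hc
      have hc' : d.contains k = false := by simpa using hc
      have : d.getD k 0 = 0 := PySem.Dict.getD_of_not_contains d 0 hc'
      omega
    have hstep : stepA (d, t) k =
        (d.insert k (d.getD k 0 - 1), t + (d.getD k 0 - 1)) := by
      simp only [stepA]
      rw [if_neg (by simpa using (by omega : ¬ d.getD k 0 = 0))]
      simp [PySem.Dict.getD_insert_self]
    have hknotin : k ∉ ks := (List.nodup_cons.mp hnd).1
    have hnd' : ks.Nodup := (List.nodup_cons.mp hnd).2
    have hpos' : ∀ j ∈ ks, 1 ≤ (d.insert k (d.getD k 0 - 1)).getD j 0 := by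
      intro j hj
      rw [PySem.Dict.getD_insert_of_ne d _ _ (by rintro rfl; exact hknotin hj)]
      exact hpos j (by simp [hj])
    obtain ⟨h1, h2, h3⟩ := ih (d.insert k (d.getD k 0 - 1)) (t + (d.getD k 0 - 1)) hnd' hpos'
    refine ⟨?_, ?_, ?_⟩
    · intro c
      rw [List.foldl_cons, hstep, h1 c]
      by_cases hck : c = k
      · subst hck
        simp [hknotin, PySem.Dict.getD_insert_self]
      · by_cases hcm : c ∈ ks <;>
          simp [hcm, hck, PySem.Dict.getD_insert_of_ne d _ _ hck]
    · rw [List.foldl_cons, hstep, h2, PySem.Dict.keys_insert_of_contains d _ hcont]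
    · rw [List.foldl_cons, hstep, h3]
      have hmc : ks.map (fun j => (d.insert k (d.getD k 0 - 1)).getD j 0 - 1)
           = ks.map (fun j => d.getD j 0 - 1) := by
        apply List.map_congr_left
        intro j hj
        rw [PySem.Dict.getD_insert_of_ne d _ _ (by rintro rfl; exact hknotin hj)]
      rw [hmc]
      simp only [List.map_cons, List.sum_cons]
      ring

theorem sum_sub_one (K : List Char) (f : Char → Nat) (h : ∀ k ∈ K, 1 ≤ f k) :
    (K.map (fun k => f k - 1)).sum + K.length = (K.map f).sum := by
  induction K with
  | nil => simp
  | cons k K ih =>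
    have h1 := h k (by simp)
    have := ih (fun j hj => h j (by simp [hj]))
    simp only [List.map_cons, List.sum_cons, List.length_cons]
    omega

theorem sum_count_ofList (l : List Char) :
    ((PySem.Set.ofList l).map (fun k => l.count k)).sum = l.length := by
  have hp : (PySem.Set.ofList l).Perm l.dedup := by
    rw [List.perm_ext_iff_of_nodup (PySem.Set.nodup_ofList l) l.nodup_dedup]
    intro a
    rw [PySem.Set.mem_ofList, List.mem_dedup]
  rw [(hp.map (fun k => l.count k)).sum_eq]
  exact List.sum_map_count_dedup_eq_length l

-- facts about A's first loop, instantiated at the counter of l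
theorem afterLoop_spec (l : List Char) :
    (∀ c, (afterLoop l).1.getD c 0 =
        if c ∈ l then (l.count c : Int) - 1 else (l.count c : Int)) ∧
    (afterLoop l).1.keys = PySem.Set.ofList l ∧
    (afterLoop l).2 = ((PySem.Set.ofList l).map (fun k => (l.count k : Int) - 1)).sum := by
  have hpos : ∀ k ∈ (PySem.Dict.counter l).keys, 1 ≤ (PySem.Dict.counter l).getD k 0 := by
    intro k hk
    rw [PySem.Dict.getD_counter]
    have : k ∈ l := by
      rw [PySem.Dict.keys_counter, PySem.Set.mem_ofList] at hk; exact hk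
    have := List.count_pos_iff.mpr this
    omega
  obtain ⟨h1, h2, h3⟩ := stepA_fold _ _ 0 (PySem.Dict.nodup_keys_counter l) hpos
  unfold afterLoop
  refine ⟨?_, ?_, ?_⟩
  · intro c
    rw [h1 c, PySem.Dict.getD_counter, PySem.Dict.keys_counter]
    by_cases hc : c ∈ l <;> simp [hc, PySem.Set.mem_ofList]
  · rw [h2, PySem.Dict.keys_counter]
  · rw [h3, PySem.Dict.keys_counter]
    simp only [PySem.Dict.getD_counter, zero_add]

theorem buildNext_eq (l : List Char) :
    buildNext (afterLoop l).1 (afterLoop l).1.keys =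
      (PySem.Set.ofList l).flatMap (fun i => List.replicate (l.count i - 1) i) := by
  obtain ⟨h1, h2, _⟩ := afterLoop_spec l
  unfold buildNext
  rw [PySem.List.foldl_append_eq_flatMap, List.nil_append, h2]
  apply List.flatMap_congr
  intro i hi
  have hil : i ∈ l := (PySem.Set.mem_ofList l i).mp hi
  rw [h1 i, if_pos hil, PySem.List.pyRepeat_singleton]
  congr 1
  have : 1 ≤ l.count i := List.count_pos_iff.mpr hil
  omega

-- the next-round string is strictly shorter: termination of A's recursion
theorem next_len_lt (l : List Char) (h : (afterLoop l).2 ≠ 0) :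
    (PySem.List.sorted (buildNext (afterLoop l).1 (afterLoop l).1.keys)
      (fun c => c) false).length < l.length := by
  obtain ⟨h1, h2, h3⟩ := afterLoop_spec l
  rw [(PySem.List.sorted_perm _ _ _).length_eq, buildNext_eq l]
  rw [List.length_flatMap]
  have hK : PySem.Set.ofList l ≠ [] := by
    intro hnil
    apply h
    rw [h3, hnil]
    simp
  have hcnt : ∀ k ∈ PySem.Set.ofList l, 1 ≤ l.count k := by
    intro k hk
    exact List.count_pos_iff.mpr ((PySem.Set.mem_ofList l k).mp hk)
  have key : ((PySem.Set.ofList l).map (fun k => l.count k - 1)).sum + (PySem.Set.ofList l).length = l.length := by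
    have hss := sum_sub_one (PySem.Set.ofList l) (fun k => l.count k) hcnt
    simpa [sum_count_ofList l] using hss
  have hlen : ((PySem.Set.ofList l).map fun i => (List.replicate (l.count i - 1) i).length).sum
      = ((PySem.Set.ofList l).map fun k => l.count k - 1).sum := by
    simp [List.length_replicate]
  rw [hlen]
  have hK1 : 1 ≤ (PySem.Set.ofList l).length := by
    cases hKl : PySem.Set.ofList l with
    | nil => exact absurd hKl hK
    | cons a t => simp
  omega

-- A's recursion, on the string as a list of characters
def newstringRec (l : List Char) : List Char :=
  let res := PySem.List.sorted (PySem.Set.ofList l) (fun c => c) false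
  if (afterLoop l).2 == 0 then res
  else res ++ newstringRec (PySem.List.sorted (buildNext (afterLoop l).1 (afterLoop l).1.keys) (fun c => c) false)
termination_by l.length
decreasing_by
  exact next_len_lt l (by simpa using ‹¬((afterLoop l).2 == 0) = true›)

def newstring (list1 : String) : String := String.ofList (newstringRec list1.toList)

-- ===== PORT B =====
-- one chunk of B: `"".join(sorted(c for c in counter if counter[c] > r))`
def altRound (counter : PySem.Dict Char Int) (r : Int) : List Char :=
  PySem.List.sorted (counter.keys.filter (fun c => decide (r < counter.getD c 0))) (fun c => c) false

def newstring_alt (list1 : String) : String :=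
  let counter := PySem.Dict.counter list1.toList
  if counter.items.isEmpty then ""
  else
    match PySem.List.max? counter.values (fun v => v) with
    | none => ""   -- unreachable: the counter is nonempty here
    | some m =>
      String.ofList (((PySem.List.pyRange 0 m 1).foldl
        (fun acc r => acc ++ [altRound counter r]) []).flatten)

-- ===== PRECONDITION & SPEC =====
def Spec_newstring (list1 : String) (out : String) : Prop := out = newstring_alt list1
instance (list1 : String) (out : String) : Decidable (Spec_newstring list1 out) := by unfold Spec_newstring; infer_instance

-- ===== CLAIM (what is proved, stated in full; the proofs are below) =====
def Claim_equal_newstring : Prop := ∀ (list1 : String), Dom_newstring list1 → Spec_newstring list1 (newstring list1)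

-- ===== LEMMAS AND PROOFS =====

-- B's body on a list of characters
def altList (l : List Char) : List Char :=
  let counter := PySem.Dict.counter l
  if counter.items.isEmpty then []
  else
    match PySem.List.max? counter.values (fun v => v) with
    | none => []
    | some m =>
      ((PySem.List.pyRange 0 m 1).foldl (fun acc r => acc ++ [altRound counter r]) []).flatten

theorem newstring_alt_eq (s : String) : newstring_alt s = String.ofList (altList s.toList) := by
  unfold newstring_alt altList
  dsimp only
  split
  · rfl
  · split <;> rfl

theorem count_flatMap_replicate (ks : List Char) (n : Char → Nat) (hnd : ks.Nodup) (c : Char) :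
    (ks.flatMap (fun i => List.replicate (n i) i)).count c = if c ∈ ks then n c else 0 := by
  induction ks with
  | nil => simp
  | cons k ks ih =>
    have hknotin : k ∉ ks := (List.nodup_cons.mp hnd).1
    have ih' := ih (List.nodup_cons.mp hnd).2
    simp only [List.flatMap_cons, List.count_append, ih', List.count_replicate]
    by_cases hck : c = k
    · subst hck; simp [hknotin]
    · simp [hck, Ne.symm hck, List.mem_cons]

-- the values of counter l, as counts over the distinct elements
theorem values_counter_eq (l : List Char) :
    (PySem.Dict.counter l).values = (PySem.Set.ofList l).map (fun k => (l.count k : Int)) := by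
  rw [PySem.Dict.values_eq_map_keys _ (PySem.Dict.nodup_keys_counter l) 0, PySem.Dict.keys_counter]
  exact List.map_congr_left (fun k _ => PySem.Dict.getD_counter l k)

theorem max_facts (l : List Char) (m : Int)
    (hm : PySem.List.max? (PySem.Dict.counter l).values (fun v => v) = some m) :
    (∃ k0 ∈ l, (l.count k0 : Int) = m) ∧ (∀ k ∈ l, (l.count k : Int) ≤ m) := by
  have hmem := PySem.List.max?_mem hm
  have hmax := PySem.List.max?_isMax hm
  rw [values_counter_eq] at hmem hmax
  constructor
  · obtain ⟨k0, hk0, hk0v⟩ := List.mem_map.mp hmem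
    exact ⟨k0, (PySem.Set.mem_ofList l k0).mp hk0, hk0v⟩
  · intro k hk
    exact hmax _ (List.mem_map.mpr ⟨k, (PySem.Set.mem_ofList l k).mpr hk, rfl⟩)

theorem all_zero_of_sum_zero (xs : List Int) (h : ∀ x ∈ xs, 0 ≤ x) (hs : xs.sum = 0) :
    ∀ x ∈ xs, x = 0 := by
  induction xs with
  | nil => simp
  | cons a t ih =>
    have ha : 0 ≤ a := h a (by simp)
    have ht : 0 ≤ t.sum := List.sum_nonneg (fun x hx => h x (by simp [hx]))
    simp only [List.sum_cons] at hs
    intro x hx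
    rcases List.mem_cons.mp hx with rfl | hx'
    · omega
    · exact ih (fun y hy => h y (by simp [hy])) (by omega) x hx'

-- round 0 of B is exactly A's `res`
theorem chunkZero (l : List Char) :
    altRound (PySem.Dict.counter l) 0 = PySem.List.sorted (PySem.Set.ofList l) (fun c => c) false := by
  unfold altRound
  congr 1
  rw [PySem.Dict.keys_counter]
  apply List.filter_eq_self.mpr
  intro c hc
  rw [PySem.Dict.getD_counter]
  have : 0 < l.count c := List.count_pos_iff.mpr ((PySem.Set.mem_ofList l c).mp hc)
  simpa using (by exact_mod_cast this : (0 : Int) < (l.count c : Int))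

-- B's body, in closed form, for a nonempty input
theorem altList_closed (l : List Char) (hne : l ≠ []) (m : Int)
    (hm : PySem.List.max? (PySem.Dict.counter l).values (fun v => v) = some m) :
    altList l = ((PySem.List.pyRange 0 m 1).map (altRound (PySem.Dict.counter l))).flatten := by
  have hKne : PySem.Set.ofList l ≠ [] := by
    cases l with
    | nil => exact absurd rfl hne
    | cons a t =>
      intro h
      have : a ∈ PySem.Set.ofList (a :: t) := (PySem.Set.mem_ofList _ a).mpr (by simp)
      rw [h] at this
      simp at this
  have hitems : ((PySem.Dict.counter l).items.isEmpty) = false := by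
    rw [PySem.Dict.items_counter]
    simpa [List.isEmpty_iff] using hKne
  unfold altList
  dsimp only
  rw [hitems, if_neg (by simp), hm]
  dsimp only
  rw [PySem.List.foldl_append_singleton_eq_map, List.nil_append]

-- counts after one of A's rounds drop by one
theorem count_next (l : List Char) (c : Char) :
    (PySem.List.sorted (buildNext (afterLoop l).1 (afterLoop l).1.keys) (fun c => c) false).count c
      = l.count c - 1 := by
  rw [(PySem.List.sorted_perm _ _ _).count_eq, buildNext_eq l,
    count_flatMap_replicate _ _ (PySem.Set.nodup_ofList l) c]
  by_cases hc : c ∈ l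
  · rw [if_pos ((PySem.Set.mem_ofList l c).mpr hc)]
  · rw [if_neg (fun h => hc ((PySem.Set.mem_ofList l c).mp h))]
    have : l.count c = 0 := List.count_eq_zero.mpr hc
    omega

-- the chunks of round r+1 on l are the chunks of round r on the decremented string
theorem round_shift (l l' : List Char) (hc : ∀ c, l'.count c = l.count c - 1) (r : Int) (hr : 0 ≤ r) :
    altRound (PySem.Dict.counter l') r = altRound (PySem.Dict.counter l) (r + 1) := by
  unfold altRound
  rw [PySem.List.sorted_id_eq_sorted_id_iff_perm]
  rw [List.perm_ext_iff_of_nodup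
    ((PySem.Dict.nodup_keys_counter l').filter _) ((PySem.Dict.nodup_keys_counter l).filter _)]
  intro c
  simp only [List.mem_filter, PySem.Dict.keys_counter, PySem.Set.mem_ofList,
    PySem.Dict.getD_counter, decide_eq_true_eq]
  have hcc := hc c
  constructor
  · rintro ⟨hcl', hlt⟩
    have h1 : 1 ≤ l'.count c := List.count_pos_iff.mpr hcl'
    have h2 : 1 ≤ l.count c := by omega
    refine ⟨List.count_pos_iff.mp (by omega), by omega⟩
  · rintro ⟨hcl, hlt⟩
    have h2 : 1 ≤ l.count c := List.count_pos_iff.mpr hcl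
    have h1 : 1 ≤ l'.count c := by omega
    exact ⟨List.count_pos_iff.mp (by omega), by omega⟩

theorem ofList_ne_nil (l : List Char) (hne : l ≠ []) : PySem.Set.ofList l ≠ [] := by
  cases l with
  | nil => exact absurd rfl hne
  | cons a t =>
    intro h
    have : a ∈ PySem.Set.ofList (a :: t) := (PySem.Set.mem_ofList _ a).mpr (by simp)
    rw [h] at this
    simp at this

theorem newstringRec_nil : newstringRec [] = altList [] := by
  rw [newstringRec]
  rw [if_pos (by decide)]
  decide

theorem main_eq_aux : ∀ (n : Nat) (l : List Char), l.length ≤ n → newstringRec l = altList l := by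
  intro n
  induction n with
  | zero =>
    intro l hl
    have hnil : l = [] := List.eq_nil_of_length_eq_zero (Nat.le_zero.mp hl)
    subst hnil
    exact newstringRec_nil
  | succ n ih =>
    intro l hl
    by_cases hnil : l = []
    · subst hnil; exact newstringRec_nil
    obtain ⟨h1, h2, h3⟩ := afterLoop_spec l
    have hKne := ofList_ne_nil l hnil
    cases hm : PySem.List.max? (PySem.Dict.counter l).values (fun v => v) with
    | none =>
      exfalso
      have hv := (PySem.List.max?_eq_none_iff _ _).mp hm
      rw [values_counter_eq] at hv
      exact hKne (List.map_eq_nil_iff.mp hv)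
    | some m =>
    obtain ⟨⟨k0, hk0l, hk0⟩, hmax⟩ := max_facts l m hm
    rw [newstringRec]
    by_cases hz : (afterLoop l).2 = 0
    · -- only one round: every count is 1 and m = 1
      rw [if_pos (by simpa using hz)]
      have hnonneg : ∀ x ∈ (PySem.Set.ofList l).map (fun k => (l.count k : Int) - 1), 0 ≤ x := by
        intro x hx
        obtain ⟨j, hj, rfl⟩ := List.mem_map.mp hx
        have : 1 ≤ l.count j := List.count_pos_iff.mpr ((PySem.Set.mem_ofList l j).mp hj)
        omega
      have hall : ∀ k ∈ l, l.count k = 1 := by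
        intro k hk
        have hmem : ((l.count k : Int) - 1) ∈ (PySem.Set.ofList l).map (fun k => (l.count k : Int) - 1) :=
          List.mem_map.mpr ⟨k, (PySem.Set.mem_ofList l k).mpr hk, rfl⟩
        have hz0 := all_zero_of_sum_zero _ hnonneg (by rw [← h3]; exact hz) _ hmem
        have : 1 ≤ l.count k := List.count_pos_iff.mpr hk
        omega
      have hm1 : m = 1 := by
        rw [← hk0, hall k0 hk0l]
        rfl
      subst hm1
      rw [altList_closed l hnil 1 hm]
      rw [show PySem.List.pyRange 0 1 1 = [(0 : Int)] from by decide]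
      simp [chunkZero]
    · -- at least two rounds
      rw [if_neg (by simpa using hz)]
      set L' := PySem.List.sorted (buildNext (afterLoop l).1 (afterLoop l).1.keys) (fun c => c) false with hL'
      have hcnt' : ∀ c, L'.count c = l.count c - 1 := fun c => count_next l c
      -- some character occurs at least twice
      have hk2 : ∃ k2 ∈ l, 2 ≤ l.count k2 := by
        by_contra hno
        simp only [not_exists, not_and, not_le] at hno
        apply hz
        rw [h3]
        apply List.sum_eq_zero
        intro x hx
        obtain ⟨j, hj, rfl⟩ := List.mem_map.mp hx
        have hjl : j ∈ l := (PySem.Set.mem_ofList l j).mp hj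
        have h1' : 1 ≤ l.count j := List.count_pos_iff.mpr hjl
        have h2' := hno j hjl
        omega
      obtain ⟨k2, hk2l, hk2c⟩ := hk2
      have hm2 : 2 ≤ m := le_trans (by exact_mod_cast hk2c) (hmax k2 hk2l)
      have hL'ne : L' ≠ [] := by
        intro hLnil
        have := hcnt' k2
        rw [hLnil] at this
        simp at this
        omega
      -- the maximum over the decremented counts is m - 1
      cases hm' : PySem.List.max? (PySem.Dict.counter L').values (fun v => v) with
      | none =>
        exfalso
        have hv := (PySem.List.max?_eq_none_iff _ _).mp hm'
        rw [values_counter_eq] at hv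
        exact (ofList_ne_nil L' hL'ne) (List.map_eq_nil_iff.mp hv)
      | some m' =>
      obtain ⟨⟨k0', hk0'l, hk0'⟩, hmax'⟩ := max_facts L' m' hm'
      have hm'eq : m' = m - 1 := by
        have hu : m' ≤ m - 1 := by
          have hc1 : 1 ≤ L'.count k0' := List.count_pos_iff.mpr hk0'l
          have := hcnt' k0'
          have := hmax k0' (by
            have : 1 ≤ l.count k0' := by have := hcnt' k0'; omega
            exact List.count_pos_iff.mp this)
          omega
        have hlow : m - 1 ≤ m' := by
          have hcn : L'.count k0 = l.count k0 - 1 := hcnt' k0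
          have hk0L' : k0 ∈ L' := by
            apply List.count_pos_iff.mp
            omega
          have := hmax' k0 hk0L'
          omega
        omega
      subst hm'eq
      -- close both sides
      rw [altList_closed l hnil m hm]
      have hrec : newstringRec L' = altList L' := by
        apply ih
        have := next_len_lt l hz
        rw [← hL'] at this
        omega
      rw [hrec, altList_closed L' hL'ne (m - 1) hm']
      -- turn both integer ranges into `List.range`
      obtain ⟨mn, rfl⟩ : ∃ mn : Nat, m = (mn : Int) := ⟨m.toNat, (Int.toNat_of_nonneg (by omega)).symm⟩
      rw [show (mn : Int) - 1 = ((mn - 1 : Nat) : Int) from by omega,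
        PySem.List.pyRange_zero_natCast, PySem.List.pyRange_zero_natCast,
        List.map_map, List.map_map,
        show List.range mn = List.range ((mn - 1) + 1) from by congr 1; omega,
        List.range_succ_eq_map, List.map_cons, List.flatten_cons, List.map_map]
      congr 1
      · simpa using (chunkZero l).symm
      · congr 1
        apply List.map_congr_left
        intro i _
        have hshift := round_shift l L' hcnt' (i : Int) (by positivity)
        simp only [Function.comp_apply]
        rw [hshift]
        congr 1

theorem main_eq (l : List Char) : newstringRec l = altList l :=
  main_eq_aux l.length l le_rfl

-- ===== VERDICT (by name: the statement is the Claim_ definition above) =====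
theorem newstring_spec : Claim_equal_newstring := by
  intro s _
  unfold Spec_newstring
  rw [newstring_alt_eq]
  unfold newstring
  rw [main_eq]
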